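-- pv_equiv track=rewrite | github.com/zigzagzeeq/AutoRobot | robot/SpeechEmotionResponses.py | respond_to_emotion
-- ===== SOURCE A (Python) =====
-- def respond_to_emotion(emotion_dict):
--     """
--     Generate a response based on the detected emotions.
--     If there is a tie, respond with mixed emotions.
--     If neutral is the highest, ignore it and focus on other emotions.
--     """
--     if not emotion_dict:
--         return "No emotion detected."
--
--     # Sort emotions by frequency
--     sorted_emotions = sorted(emotion_dict.items(), key=lambda x: x[1], reverse=True)
--     highest_freq = sorted_emotions[0][1]
--
--     # Filter out neutral if it's the highest
--     if sorted_emotions[0][0] == 'neutral' and len(sorted_emotions) > 1: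
--         sorted_emotions = [emotion for emotion in sorted_emotions if emotion[0] != 'neutral']
--         if not sorted_emotions:
--             return "No significant emotion detected."
--
--     # Check for ties
--     tied_emotions = [emotion for emotion in sorted_emotions if emotion[1] == highest_freq]
--
--     if len(tied_emotions) > 1:
--         response = "Mixed emotions detected: " + ", ".join([emotion[0] for emotion in tied_emotions])
--     else:
--         response = f"Detected emotion: {tied_emotions[0][0]} with confidence {tied_emotions[0][1]}"
--
--     return response
-- ===== SOURCE B (Python) =====
-- def respond_to_emotion(emotion_dict):
--     """
--     Generate a response based on the detected emotions.
--     One max() scan instead of sorting; tied emotions collected in insertion order.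
--     """
--     if not emotion_dict:
--         return "No emotion detected."
--
--     max_freq = max(emotion_dict.values())
--     first_top = next(k for k, v in emotion_dict.items() if v == max_freq)
--     drop_neutral = first_top == 'neutral' and len(emotion_dict) > 1
--
--     tied = [k for k, v in emotion_dict.items()
--             if v == max_freq and not (drop_neutral and k == 'neutral')]
--
--     if not tied:
--         return "No significant emotion detected."
--     if len(tied) > 1:
--         return "Mixed emotions detected: " + ", ".join(tied)
--     return f"Detected emotion: {tied[0]} with confidence {max_freq}"
-- ===== Notes on version B (the rewrite author's own statement) =====
-- stated objective: simpler
-- what changed: B replaces A's sort-then-filter pipeline by a single max scan over the values plus one insertion-order filter pass that collects the tied emotions (and drops neutral under the same condition), with no sorting at all.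
-- outside the precondition, e.g. on respond_to_emotion({'neutral': 5, 'happy': 3}): A raises IndexError, B returns 'No significant emotion detected.'
-- crash fix: On dicts with more than one key where every maximum-frequency entry is keyed 'neutral' but some other key exists, A raises IndexError (it drops neutral and then indexes the empty tie list); B returns 'No significant emotion detected.'. — e.g. on respond_to_emotion([("neutral", 5), ("happy", 3)]): A raises IndexError, B returns "No significant emotion detected."
import Mathlib
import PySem

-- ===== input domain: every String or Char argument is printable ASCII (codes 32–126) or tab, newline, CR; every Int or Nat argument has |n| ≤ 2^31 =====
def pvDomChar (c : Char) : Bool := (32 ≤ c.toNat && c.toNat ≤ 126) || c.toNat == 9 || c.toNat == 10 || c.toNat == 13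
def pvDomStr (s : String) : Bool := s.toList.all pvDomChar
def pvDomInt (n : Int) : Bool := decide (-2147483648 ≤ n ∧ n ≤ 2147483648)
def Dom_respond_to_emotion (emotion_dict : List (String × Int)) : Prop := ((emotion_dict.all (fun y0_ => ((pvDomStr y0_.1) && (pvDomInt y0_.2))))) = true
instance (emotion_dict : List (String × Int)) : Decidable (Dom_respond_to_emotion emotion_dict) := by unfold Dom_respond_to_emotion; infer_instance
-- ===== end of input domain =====

-- B replaces A's sort-then-filter pipeline by a single max() scan plus one insertion-order filter (simpler, no sort).

-- ===== PORT A =====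
-- the tail of A after 'tied_emotions = …': ties check and the two response formats
def respondTailA (s2 : List (String × Int)) (highest : Int) : String :=
  let tied := s2.filter (fun p => p.2 == highest)
  if 1 < tied.length then
    "Mixed emotions detected: " ++ PySem.Str.join ", " (tied.map Prod.fst)
  else
    match PySem.List.pyGet? tied 0 with
    | some t => "Detected emotion: " ++ t.1 ++ " with confidence " ++ PySem.Int.toStr t.2
    | none => ""  -- tied_emotions[0] raises IndexError here; excluded by Pre_

def respond_to_emotion (emotion_dict : List (String × Int)) : String :=
  if emotion_dict = [] then "No emotion detected."
  else
    let sorted_emotions := PySem.List.sorted emotion_dict (fun p => p.2) true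
    match PySem.List.pyGet? sorted_emotions 0 with
    | none => ""  -- unreachable: sorted of a nonempty list is nonempty
    | some top =>
      let highest := top.2
      if top.1 == "neutral" && decide (1 < sorted_emotions.length) then
        let s2 := sorted_emotions.filter (fun p => !(p.1 == "neutral"))
        if s2 = [] then "No significant emotion detected."
        else respondTailA s2 highest
      else respondTailA sorted_emotions highest

-- ===== PORT B =====
def respond_to_emotion_alt (emotion_dict : List (String × Int)) : String :=
  if emotion_dict = [] then "No emotion detected."
  else
    match PySem.List.max? (emotion_dict.map Prod.snd) (fun v => v) with
    | none => ""  -- unreachable: emotion_dict is nonempty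
    | some maxFreq =>
      match emotion_dict.find? (fun p => p.2 == maxFreq) with
      | none => ""  -- unreachable: the maximum is attained
      | some firstTop =>
        let dropNeutral := firstTop.1 == "neutral" && decide (1 < emotion_dict.length)
        let tied := (emotion_dict.filter
            (fun p => p.2 == maxFreq && !(dropNeutral && p.1 == "neutral"))).map Prod.fst
        match tied with
        | [] => "No significant emotion detected."
        | [t] => "Detected emotion: " ++ t ++ " with confidence " ++ PySem.Int.toStr maxFreq
        | ts => "Mixed emotions detected: " ++ PySem.Str.join ", " ts

-- ===== PRECONDITION & SPEC =====
-- Pre_ excludes exactly the inputs on which A raises IndexError (tied_emotions[0] on an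
-- empty tie list): more than one entry, some key other than 'neutral', but every entry of
-- maximal frequency is keyed 'neutral'.  A returns normally everywhere else.
def Pre_respond_to_emotion (emotion_dict : List (String × Int)) : Prop :=
  ¬ (1 < emotion_dict.length ∧ (∃ p ∈ emotion_dict, p.1 ≠ "neutral") ∧
      ∀ p ∈ emotion_dict, (∀ q ∈ emotion_dict, q.2 ≤ p.2) → p.1 = "neutral")
instance (emotion_dict : List (String × Int)) : Decidable (Pre_respond_to_emotion emotion_dict) := by
  unfold Pre_respond_to_emotion; infer_instance

def pvWitness_respond_to_emotion : (List (String × Int)) := [("happy", 2), ("sad", 2), ("neutral", 1)]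

-- On dicts whose maximal-frequency keys are all 'neutral' while other keys exist, A raises
-- IndexError (it drops neutral and indexes the then-empty tie list); B returns "No significant emotion detected.".
def Raises_respond_to_emotion (emotion_dict : List (String × Int)) : Prop :=
  1 < emotion_dict.length ∧ (∃ p ∈ emotion_dict, p.1 ≠ "neutral") ∧
    ∀ p ∈ emotion_dict, (∀ q ∈ emotion_dict, q.2 ≤ p.2) → p.1 = "neutral"
instance (emotion_dict : List (String × Int)) : Decidable (Raises_respond_to_emotion emotion_dict) := by
  unfold Raises_respond_to_emotion; infer_instance

def pvRaiseWitness_respond_to_emotion : (List (String × Int)) := [("neutral", 5), ("happy", 3)]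
def pvRaiseWitnessOut_respond_to_emotion : String := "No significant emotion detected."

def Spec_respond_to_emotion (emotion_dict : List (String × Int)) (out : String) : Prop :=
  out = respond_to_emotion_alt emotion_dict
instance (emotion_dict : List (String × Int)) (out : String) : Decidable (Spec_respond_to_emotion emotion_dict out) := by
  unfold Spec_respond_to_emotion; infer_instance

-- ===== CLAIM (what is proved, stated in full; the proofs are below) =====
def Claim_equal_respond_to_emotion : Prop := ∀ (emotion_dict : List (String × Int)), Dom_respond_to_emotion emotion_dict → Pre_respond_to_emotion emotion_dict → Spec_respond_to_emotion emotion_dict (respond_to_emotion emotion_dict)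

def Claim_raises_respond_to_emotion : Prop := (∀ (emotion_dict : List (String × Int)), Dom_respond_to_emotion emotion_dict → Raises_respond_to_emotion emotion_dict → ¬ Pre_respond_to_emotion emotion_dict) ∧ (Dom_respond_to_emotion (pvRaiseWitness_respond_to_emotion) ∧ Raises_respond_to_emotion (pvRaiseWitness_respond_to_emotion) ∧ respond_to_emotion_alt (pvRaiseWitness_respond_to_emotion) = pvRaiseWitnessOut_respond_to_emotion)

-- ===== LEMMAS AND PROOFS =====

-- stability of PySem's insertion sort for the maximal key value, proved through its
-- foldl/insertBy characterisation (sorted_rev_eq_foldl_insertBy)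

lemma insertBy_pairwise_desc (x : String × Int) (acc : List (String × Int))
    (h : acc.Pairwise (fun a b => b.2 ≤ a.2)) :
    (PySem.List.insertBy (fun a b => decide (b.2 < a.2)) x acc).Pairwise (fun a b => b.2 ≤ a.2) := by
  induction acc with
  | nil => simp [PySem.List.insertBy]
  | cons y ys ih =>
    simp only [PySem.List.insertBy]
    rcases List.pairwise_cons.mp h with ⟨hy, hys⟩
    split
    · rename_i hlt
      refine List.pairwise_cons.mpr ⟨?_, h⟩
      intro b hb
      rcases List.mem_cons.mp hb with rfl | hb
      · exact le_of_lt (by simpa using hlt)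
      · exact le_trans (hy b hb) (le_of_lt (by simpa using hlt))
    · rename_i hnlt
      refine List.pairwise_cons.mpr ⟨?_, ih hys⟩
      intro b hb
      rw [PySem.List.mem_insertBy] at hb
      rcases hb with rfl | hb
      · simpa using hnlt
      · exact hy b hb

lemma insertBy_filter_max (m : Int) (x : String × Int) (acc : List (String × Int))
    (hs : acc.Pairwise (fun a b => b.2 ≤ a.2)) (hxm : x.2 ≤ m) :
    (PySem.List.insertBy (fun a b => decide (b.2 < a.2)) x acc).filter (fun p => p.2 == m)
      = acc.filter (fun p => p.2 == m) ++ [x].filter (fun p => p.2 == m) := by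
  induction acc with
  | nil => simp [PySem.List.insertBy]
  | cons y ys ih =>
    rcases List.pairwise_cons.mp hs with ⟨hy, hys⟩
    by_cases hlt : y.2 < x.2
    · have hins : PySem.List.insertBy (fun a b => decide (b.2 < a.2)) x (y :: ys) = x :: y :: ys := by
        simp only [PySem.List.insertBy]
        simp [hlt]
      have hnil : (y :: ys).filter (fun p => p.2 == m) = [] := by
        rw [List.filter_eq_nil_iff]
        intro p hp
        rcases List.mem_cons.mp hp with rfl | hp
        · simp; omega
        · have := hy p hp; simp; omega
      rw [hins, List.filter_cons, hnil]
      by_cases hx : x.2 = m <;> simp [hx]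
    · have hins : PySem.List.insertBy (fun a b => decide (b.2 < a.2)) x (y :: ys)
          = y :: PySem.List.insertBy (fun a b => decide (b.2 < a.2)) x ys := by
        simp only [PySem.List.insertBy]
        simp [hlt]
      rw [hins, List.filter_cons, ih hys, List.filter_cons]
      by_cases hy2 : y.2 = m <;> simp [hy2]

lemma foldl_insertBy_filter_max (m : Int) :
    ∀ (rest acc : List (String × Int)), acc.Pairwise (fun a b => b.2 ≤ a.2) →
    (∀ p ∈ rest, p.2 ≤ m) →
    (rest.foldl (fun acc x => PySem.List.insertBy (fun a b => decide (b.2 < a.2)) x acc) acc).filter (fun p => p.2 == m)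
      = acc.filter (fun p => p.2 == m) ++ rest.filter (fun p => p.2 == m) := by
  intro rest
  induction rest with
  | nil => intro acc _ _; simp
  | cons x rs ih =>
    intro acc hs hb
    simp only [List.foldl_cons]
    rw [ih _ (insertBy_pairwise_desc x acc hs) (fun p hp => hb p (List.mem_cons_of_mem _ hp)),
        insertBy_filter_max m x acc hs (hb x List.mem_cons_self), List.filter_cons]
    by_cases hx : x.2 = m <;> simp [hx]

lemma sorted_filter_max (m : Int) (l : List (String × Int)) (hb : ∀ p ∈ l, p.2 ≤ m) :
    (PySem.List.sorted l (fun p => p.2) true).filter (fun p => p.2 == m)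
      = l.filter (fun p => p.2 == m) := by
  rw [PySem.List.sorted_rev_eq_foldl_insertBy]
  simpa using foldl_insertBy_filter_max m l [] (by simp) hb

-- both ports format the tie list T (all of whose entries carry the maximal value m) identically
lemma tail_match (T : List (String × Int)) (m : Int) (hne : T ≠ []) (hm : ∀ p ∈ T, p.2 = m) :
    (if 1 < T.length then "Mixed emotions detected: " ++ PySem.Str.join ", " (T.map Prod.fst)
     else match PySem.List.pyGet? T 0 with
          | some t => "Detected emotion: " ++ t.1 ++ " with confidence " ++ PySem.Int.toStr t.2
          | none => "")
    = (match T.map Prod.fst with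
      | [] => "No significant emotion detected."
      | [t] => "Detected emotion: " ++ t ++ " with confidence " ++ PySem.Int.toStr m
      | ts => "Mixed emotions detected: " ++ PySem.Str.join ", " ts) := by
  match T with
  | [] => exact absurd rfl hne
  | [t0] =>
    have : t0.2 = m := hm t0 (by simp)
    simp [PySem.List.pyGet?, PySem.List.pyIdx?, this]
  | t0 :: t1 :: ts =>
    simp

-- respondTailA on a list whose maximal-value entries (in order) are T, phrased as B's match
lemma respondTailA_eq (s2 : List (String × Int)) (m : Int)
    (hne : s2.filter (fun p => p.2 == m) ≠ []) :
    respondTailA s2 m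
      = (match (s2.filter (fun p => p.2 == m)).map Prod.fst with
        | [] => "No significant emotion detected."
        | [t] => "Detected emotion: " ++ t ++ " with confidence " ++ PySem.Int.toStr m
        | ts => "Mixed emotions detected: " ++ PySem.Str.join ", " ts) := by
  unfold respondTailA
  exact tail_match _ m hne (by intro p hp; simpa using (List.mem_filter.mp hp).2)

theorem respond_to_emotion_spec : Claim_equal_respond_to_emotion := by
  unfold Claim_equal_respond_to_emotion
  intro l _ hpre
  unfold Spec_respond_to_emotion
  by_cases hnil : l = []
  · subst hnil; rfl
  · unfold respond_to_emotion respond_to_emotion_alt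
    rw [if_neg hnil, if_neg hnil]
    -- the maximum of the values
    cases hmax : PySem.List.max? (l.map Prod.snd) (fun v => v) with
    | none =>
      rw [PySem.List.max?_eq_none_iff] at hmax
      exact absurd (List.map_eq_nil_iff.mp hmax) hnil
    | some m =>
    have hub : ∀ p ∈ l, p.2 ≤ m := by
      intro p hp
      exact PySem.List.max?_isMax hmax p.2 (List.mem_map_of_mem hp)
    have hmem : ∃ q ∈ l, q.2 = m := by
      rcases PySem.List.max?_mem hmax with hq
      rcases List.mem_map.mp hq with ⟨q, hql, hq2⟩
      exact ⟨q, hql, hq2⟩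
    have hstab := sorted_filter_max m l hub
    -- the sorted list is nonempty; its head
    cases hS : PySem.List.sorted l (fun p => p.2) true with
    | nil => exact absurd ((PySem.List.sorted_eq_nil_iff l _ true).mp hS) hnil
    | cons top t =>
    have htopl : top ∈ l := by
      have : top ∈ PySem.List.sorted l (fun p => p.2) true := by rw [hS]; simp
      exact (List.Perm.mem_iff (PySem.List.sorted_perm l _ true)).mp this
    have htop2 : top.2 = m := by
      rcases hmem with ⟨q, hql, hq2⟩
      have h1 : top.2 ≤ m := hub top htopl
      have h2 : q.2 ≤ top.2 := PySem.List.key_head_sorted_rev_ge l (fun p => p.2) hS q hql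
      omega
    -- the max-value entries of l, in insertion order, start with top
    have hfilter : l.filter (fun p => p.2 == m) = top :: t.filter (fun p => p.2 == m) := by
      rw [← hstab, hS, List.filter_cons, if_pos (by simp [htop2])]
    have hfind : l.find? (fun p => p.2 == m) = some top := by
      rw [← List.head?_filter, hfilter]; rfl
    have hget : PySem.List.pyGet? (top :: t) 0 = some top := by
      simp [PySem.List.pyGet?, PySem.List.pyIdx?]
    have hlen : (top :: t).length = l.length := by
      rw [← hS, PySem.List.length_sorted]
    simp only [hget, hfind, hlen]
    by_cases hc : (top.1 == "neutral" && decide (1 < l.length)) = true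
    · rw [if_pos hc]
      obtain ⟨hcn, hclen⟩ := Bool.and_eq_true_iff.mp hc
      by_cases hs2 : (top :: t).filter (fun p => !(p.1 == "neutral")) = []
      · rw [if_pos hs2]
        have hall : ∀ p ∈ l, p.1 = "neutral" := by
          intro p hp
          have hpS : p ∈ top :: t := by
            rw [← hS]; exact (List.Perm.mem_iff (PySem.List.sorted_perm l _ true)).mpr hp
          simpa using List.filter_eq_nil_iff.mp hs2 p hpS
        simp only [hc, Bool.true_and]
        have hbn : l.filter (fun p => p.2 == m && !(p.1 == "neutral")) = [] := by
          rw [List.filter_eq_nil_iff]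
          intro p hp
          simp [hall p hp]
        rw [hbn]
        rfl
      · rw [if_neg hs2, htop2]
        -- the non-neutral maximal entries of l, needed nonempty by Pre_
        have hA : 1 < l.length := by simpa using hclen
        have hB : ∃ p ∈ l, p.1 ≠ "neutral" := by
          have hex : ∃ p ∈ (top :: t), (!(p.1 == "neutral")) = true := by
            by_contra h
            push Not at h
            exact hs2 (List.filter_eq_nil_iff.mpr h)
          rcases hex with ⟨p, hpS, hpn⟩
          refine ⟨p, ?_, by simpa using hpn⟩
          rw [← hS] at hpS
          exact (List.Perm.mem_iff (PySem.List.sorted_perm l _ true)).mp hpS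
        have hC : ¬(∀ p ∈ l, (∀ q ∈ l, q.2 ≤ p.2) → p.1 = "neutral") := by
          intro hC
          exact hpre ⟨hA, hB, hC⟩
        push Not at hC
        rcases hC with ⟨p, hp, hmaxp, hpn⟩
        have hp2 : p.2 = m := by
          rcases hmem with ⟨q, hql, hq2⟩
          have h1 : q.2 ≤ p.2 := hmaxp q hql
          have h2 : p.2 ≤ m := hub p hp
          omega
        have hmemf : p ∈ l.filter (fun p => p.2 == m && !(p.1 == "neutral")) := by
          rw [List.mem_filter]
          exact ⟨hp, by simp [hp2, hpn]⟩
        have hchain : ((top :: t).filter (fun p => !(p.1 == "neutral"))).filter (fun p => p.2 == m)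
            = l.filter (fun p => p.2 == m && !(p.1 == "neutral")) := by
          rw [List.filter_filter]
          have h1 : (top :: t).filter (fun p => p.2 == m && !(p.1 == "neutral"))
              = ((top :: t).filter (fun p => p.2 == m)).filter (fun p => !(p.1 == "neutral")) := by
            rw [List.filter_filter]
            exact List.filter_congr (by intro x _; rw [Bool.and_comm])
          rw [h1, ← hS, hstab, List.filter_filter]
          exact List.filter_congr (by intro x _; rw [Bool.and_comm])
        have hne : ((top :: t).filter (fun p => !(p.1 == "neutral"))).filter (fun p => p.2 == m) ≠ [] := by
          rw [hchain]
          intro h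
          rw [h] at hmemf
          exact absurd hmemf (List.not_mem_nil)
        rw [respondTailA_eq _ _ hne, hchain]
        simp only [hc, Bool.true_and]
    · have hc' : (top.1 == "neutral" && decide (1 < l.length)) = false := by
        simpa using hc
      rw [if_neg hc, htop2]
      have hST : (top :: t).filter (fun p => p.2 == m) = l.filter (fun p => p.2 == m) := by
        rw [← hS, hstab]
      rw [respondTailA_eq _ _ (by rw [hST, hfilter]; simp), hST]
      simp only [hc', Bool.false_and, Bool.not_false, Bool.and_true]

theorem respond_to_emotion_raises : Claim_raises_respond_to_emotion := by
  unfold Claim_raises_respond_to_emotion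
  constructor
  · intro l _ hr hp; exact hp hr
  · refine ⟨by decide, by decide, by decide⟩

-- self-check of the crash-fix block: B's port really returns the stated value at the raise witness
theorem respond_to_emotion_raises_witness :
    respond_to_emotion_alt pvRaiseWitness_respond_to_emotion = pvRaiseWitnessOut_respond_to_emotion :=
  respond_to_emotion_raises.2.2.2
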